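-- pv_equiv track=rewrite | github.com/jiheneguesmi/Business-Value-Knowledge-Graph | main/Extraction_et_Embedding/classification_test/multi_llm_comparaison.py | determine_label
-- ===== SOURCE A (Python) =====
-- PRIORITY_ORDER = ["ROI", "Obligation", "Notoriété", "Description"]
--
-- def determine_label(roi: int, not_: int, obl: int) -> str:
--     if roi == 0 and not_ == 0 and obl == 0:
--         return "Description"
--     scores = {"ROI": roi, "Obligation": obl, "Notoriété": not_}
--     max_score = max(scores.values())
--     tied = [c for c, s in scores.items() if s == max_score]
--     for priority in PRIORITY_ORDER:
--         if priority in tied: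
--             return priority
--     return tied[0]
-- ===== SOURCE B (Python) =====
-- def determine_label(roi: int, not_: int, obl: int) -> str:
--     if roi == 0 and not_ == 0 and obl == 0:
--         return "Description"
--     best_label, best_score = "ROI", roi
--     for label, score in (("Obligation", obl), ("Notoriété", not_)):
--         if score > best_score:
--             best_label, best_score = label, score
--     return best_label
-- ===== Notes on version B (the rewrite author's own statement) =====
-- stated objective: simpler
-- what changed: Replaces the dict + max() + tied-list + priority-loop multi-pass with a single linear scan over (label,score) pairs in priority order, updating the running best only on a strict greater-than so the earliest priority wins ties.
import Mathlib
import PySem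

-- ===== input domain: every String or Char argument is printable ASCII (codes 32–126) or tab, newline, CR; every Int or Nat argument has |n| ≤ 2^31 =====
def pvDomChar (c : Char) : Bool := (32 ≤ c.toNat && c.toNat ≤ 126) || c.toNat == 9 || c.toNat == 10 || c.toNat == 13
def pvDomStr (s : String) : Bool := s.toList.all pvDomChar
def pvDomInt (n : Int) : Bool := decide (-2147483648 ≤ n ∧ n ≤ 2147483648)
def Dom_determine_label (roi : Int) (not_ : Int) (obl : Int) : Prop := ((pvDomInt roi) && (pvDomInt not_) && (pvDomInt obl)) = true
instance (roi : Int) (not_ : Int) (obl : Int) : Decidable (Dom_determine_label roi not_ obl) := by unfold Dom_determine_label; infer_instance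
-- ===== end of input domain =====

-- ===== PORT A =====
-- B replaces A's dict+max+tied-list+priority-loop with one strict-> running-best scan (objective: simpler).
def PRIORITY_ORDER : List String := ["ROI", "Obligation", "Notoriété", "Description"]

def determine_label (roi : Int) (not_ : Int) (obl : Int) : String :=
  if roi = 0 ∧ not_ = 0 ∧ obl = 0 then "Description"
  else
    let scores : List (String × Int) := [("ROI", roi), ("Obligation", obl), ("Notoriété", not_)]
    let max_score : Int := (PySem.List.max? (scores.map Prod.snd) (fun v => v)).getD 0  -- list nonempty, getD never used
    let tied : List String := (scores.filter (fun p => p.2 == max_score)).map Prod.fst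
    match PRIORITY_ORDER.find? (fun priority => tied.contains priority) with
    | some priority => priority
    | none => tied.headD ""  -- tied always nonempty (contains the max), so the IndexError branch is unreachable

-- ===== PORT B =====
def determine_label_alt (roi : Int) (not_ : Int) (obl : Int) : String :=
  if roi = 0 ∧ not_ = 0 ∧ obl = 0 then "Description"
  else
    (([("Obligation", obl), ("Notoriété", not_)] : List (String × Int)).foldl
      (fun best c => if c.2 > best.2 then c else best) ("ROI", roi)).1

-- ===== PRECONDITION & SPEC =====
def Spec_determine_label (roi : Int) (not_ : Int) (obl : Int) (out : String) : Prop := out = determine_label_alt roi not_ obl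
instance (roi : Int) (not_ : Int) (obl : Int) (out : String) : Decidable (Spec_determine_label roi not_ obl out) := by unfold Spec_determine_label; infer_instance

-- ===== CLAIM (what is proved, stated in full; the proofs are below) =====
def Claim_equal_determine_label : Prop := ∀ (roi : Int) (not_ : Int) (obl : Int), Dom_determine_label roi not_ obl → Spec_determine_label roi not_ obl (determine_label roi not_ obl)

-- ===== LEMMAS AND PROOFS =====

-- ===== VERDICT (by name: the statement is the Claim_ definition above) =====
set_option maxHeartbeats 2000000 in
theorem determine_label_spec : Claim_equal_determine_label := by
  intro roi not_ obl _
  unfold Spec_determine_label determine_label determine_label_alt PRIORITY_ORDER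
  simp only [PySem.List.max?_id_cons, List.map, List.filter, List.foldl, List.find?,
    List.contains, List.headD, Option.getD, Int.max_def]
  simp only [show ∀ a b : Int, (a == b) = decide (a = b) from fun _ _ => rfl]
  rcases eq_or_ne roi not_ with h2 | h2 <;> rcases eq_or_ne obl not_ with h3 | h3 <;>
    rcases eq_or_ne roi obl with h1 | h1 <;>
    split_ifs <;> simp_all [eq_comm] <;> try omega
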